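-- pv_equiv track=rewrite | github.com/ZhaoxiongChen/FinalYearProject | src/ShipDetection/DataPrep/LabelUtil.py | label_num_calc
-- ===== SOURCE A (Python) =====
-- def label_num_calc(serial):
--
--     """Define a function that calculates the number of each label"""
--
--     has_ship = 0
--     no_ship = 0
--     for n in serial:
--         if n == '1':
--             has_ship += 1
--         else:
--             no_ship += 1
--     data = [has_ship, no_ship]
--     return data
-- ===== SOURCE B (Python) =====
-- def label_num_calc(serial):
--     """Define a function that calculates the number of each label"""
--     def go(seq):
--         # divide and conquer: count on halves, add the pair results
--         if not seq:
--             return (0, 0)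
--         if len(seq) == 1:
--             return (1, 0) if seq[0] == '1' else (0, 1)
--         mid = len(seq) // 2
--         a = go(seq[:mid])
--         b = go(seq[mid:])
--         return (a[0] + b[0], a[1] + b[1])
--     has_ship, no_ship = go(list(serial))
--     return [has_ship, no_ship]
-- ===== Notes on version B (the rewrite author's own statement) =====
-- stated objective: alternative
-- what changed: Replaces the linear two-accumulator for-loop with a recursive divide-and-conquer: split the sequence in half, count each half recursively, and add the resulting (has_ship, no_ship) pairs.
import Mathlib
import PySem

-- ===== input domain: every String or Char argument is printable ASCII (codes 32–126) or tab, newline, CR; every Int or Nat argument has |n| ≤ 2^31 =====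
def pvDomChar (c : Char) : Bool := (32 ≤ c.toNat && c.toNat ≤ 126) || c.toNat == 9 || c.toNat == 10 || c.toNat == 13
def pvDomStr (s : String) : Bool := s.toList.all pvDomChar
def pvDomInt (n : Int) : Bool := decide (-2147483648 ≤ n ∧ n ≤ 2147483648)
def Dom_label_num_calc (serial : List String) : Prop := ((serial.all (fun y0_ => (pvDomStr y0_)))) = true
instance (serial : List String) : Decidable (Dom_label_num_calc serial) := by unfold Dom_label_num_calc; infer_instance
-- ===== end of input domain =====

-- B replaces A's two-accumulator loop with a recursive divide-and-conquer count (alternative decomposition, same cost).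

-- ===== PORT A =====
-- Port of A: fold over the list keeping the two counters (has_ship, no_ship).
def label_num_calc (serial : List String) : List Int :=
  let st := serial.foldl (fun (p : Int × Int) n =>
    if n = "1" then (p.1 + 1, p.2) else (p.1, p.2 + 1)) (0, 0)
  [st.1, st.2]

-- ===== PORT B =====
-- Port of B's helper go: split in half, recurse, add the pairs.
def lncGo (seq : List String) : Int × Int :=
  match _h : seq with
  | [] => (0, 0)
  | [x] => if x = "1" then (1, 0) else (0, 1)
  | _ :: _ :: _ =>
    let mid := seq.length / 2
    let a := lncGo (seq.take mid)
    let b := lncGo (seq.drop mid)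
    (a.1 + b.1, a.2 + b.2)
termination_by seq.length
decreasing_by
  · simp_all [List.length_take]; omega
  · simp_all [List.length_drop]; omega

def label_num_calc_alt (serial : List String) : List Int :=
  let p := lncGo serial
  [p.1, p.2]

-- ===== PRECONDITION & SPEC =====
def Spec_label_num_calc (serial : List String) (out : List Int) : Prop := out = label_num_calc_alt serial
instance (serial : List String) (out : List Int) : Decidable (Spec_label_num_calc serial out) := by unfold Spec_label_num_calc; infer_instance

-- ===== CLAIM (what is proved, stated in full; the proofs are below) =====
def Claim_equal_label_num_calc : Prop := ∀ (serial : List String), Dom_label_num_calc serial → Spec_label_num_calc serial (label_num_calc serial)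

-- ===== LEMMAS AND PROOFS =====

-- A's fold computes (count of "1", rest) shifted by the initial accumulator.
lemma count_fold (serial : List String) (a b : Int) :
    serial.foldl (fun (p : Int × Int) n =>
      if n = "1" then (p.1 + 1, p.2) else (p.1, p.2 + 1)) (a, b)
    = (a + serial.count "1",
       b + (serial.length : Int) - serial.count "1") := by
  induction serial generalizing a b with
  | nil => simp
  | cons h t ih =>
      simp only [List.foldl_cons, List.count_cons]
      by_cases hh : h = "1"
      · simp [hh, ih]; constructor <;> ring
      · simp [hh, ih]; push_cast; ring

-- B's divide-and-conquer also computes (count of "1", length - count).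
lemma lncGo_eq (seq : List String) :
    lncGo seq = ((seq.count "1" : Int), (seq.length : Int) - seq.count "1") := by
  induction seq using lncGo.induct with
  | case1 => simp [lncGo]
  | case2 => simp [lncGo]
  | case3 x hx => simp [lncGo, hx]
  | case4 x y t mid ih1 ih2 =>
      have hc : (List.take mid (x :: y :: t)).count "1"
          + (List.drop mid (x :: y :: t)).count "1" = (x :: y :: t).count "1" := by
        rw [← List.count_append, List.take_append_drop]
      have hl : (List.take mid (x :: y :: t)).length
          + (List.drop mid (x :: y :: t)).length = (x :: y :: t).length := by
        rw [← List.length_append, List.take_append_drop]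
      rw [lncGo, show (x :: y :: t).length / 2 = mid from rfl]
      simp only [ih1, ih2, Prod.mk.injEq]
      refine ⟨by push_cast [← hc]; ring, ?_⟩
      push_cast [← hc, ← hl]; ring

-- ===== VERDICT (by name: the statement is the Claim_ definition above) =====
theorem label_num_calc_spec : Claim_equal_label_num_calc := by
  intro serial _
  unfold Spec_label_num_calc label_num_calc label_num_calc_alt
  simp [count_fold, lncGo_eq]
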